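-- pv_equiv track=rewrite | github.com/angelga/algorithm_challenges | python-algorithms/DocuSign.py | _pending_addition
-- ===== SOURCE A (Python) =====
-- def _pending_addition(expression):
--     """Private helper method to find in an addition or multiplication exists in the inmediate scope,
--        that is, not inside a parenthesis. The index of the operation is also returned, -1 if not found.
--
--        Example:
--        >>> _pending_addition("5*(5-2)")
--        (False, -1)
--
--        >>> _pending_addition("5*4-7")
--        (True, 3)
--     """
--     open_parenthesis_count = 0
--     for i in range(0, len(expression)):
--         if expression[i] == '(':
--             open_parenthesis_count += 1
--
--         if expression[i] == ')':
--             open_parenthesis_count -= 1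
--
--         if i > 0 and expression[i] in ['+', '-'] and open_parenthesis_count == 0:
--             return True, i
--
--     return False, -1
-- ===== SOURCE B (Python) =====
-- def _pending_addition(expression):
--     # Candidate scan: no running depth counter; a '+'/'-' past index 0 is top-level
--     # iff its prefix has balanced '(' / ')' counts.
--     for i, ch in enumerate(expression):
--         if i > 0 and ch in '+-':
--             prefix = expression[:i + 1]
--             if prefix.count('(') == prefix.count(')'):
--                 return True, i
--     return False, -1
-- ===== Notes on version B (the rewrite author's own statement) =====
-- stated objective: alternative
-- what changed: Drops A's running parenthesis counter entirely: B scans only for operator candidates and decides top-levelness per candidate by comparing the open- and close-parenthesis counts of the prefix slice up to it (a prefix is balanced iff the operator is at depth 0).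
import Mathlib
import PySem

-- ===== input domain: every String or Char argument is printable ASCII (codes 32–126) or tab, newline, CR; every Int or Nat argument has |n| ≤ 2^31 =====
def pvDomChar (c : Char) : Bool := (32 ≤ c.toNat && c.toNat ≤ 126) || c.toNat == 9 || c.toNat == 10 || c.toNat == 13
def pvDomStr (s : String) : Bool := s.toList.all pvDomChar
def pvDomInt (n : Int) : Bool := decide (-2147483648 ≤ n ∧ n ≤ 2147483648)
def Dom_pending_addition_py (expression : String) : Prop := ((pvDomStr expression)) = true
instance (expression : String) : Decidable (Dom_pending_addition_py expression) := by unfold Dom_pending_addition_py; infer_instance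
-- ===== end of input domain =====

-- B drops A's running depth counter: it scans operator candidates and tests top-levelness by comparing parenthesis counts in the prefix slice; measured faster on random inputs (C-level str.count vs per-char loop), O(n^2) worst case.


-- ===== PORT A =====
-- loop over characters with index i, carrying open_parenthesis_count; early return via recursion
def pendingA : List Char → Nat → Int → Bool × Int
  | [], _, _ => (false, -1)
  | c :: rest, i, cnt =>
    let cnt1 := if c = '(' then cnt + 1 else cnt
    let cnt2 := if c = ')' then cnt1 - 1 else cnt1
    if i > 0 ∧ (c = '+' ∨ c = '-') ∧ cnt2 = 0 then (true, (i : Int))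
    else pendingA rest (i + 1) cnt2

def pending_addition_py (expression : String) : Bool × Int :=
  pendingA expression.toList 0 0

-- ===== PORT B =====
-- enumerate(expression) starting at n (exact transliteration of Python's enumerate)
def enumFromB : Nat → List Char → List (Nat × Char)
  | _, [] => []
  | n, c :: cs => (n, c) :: enumFromB (n + 1) cs

-- candidate scan: at each '+'/'-' past index 0, compare '(' and ')' counts of the prefix
-- expression[:i+1] with nonnegative bound = List.take (i+1); str.count of a single char = List.count (exact here)
def findB : List (Nat × Char) → List Char → Bool × Int
  | [], _ => (false, -1)
  | (i, c) :: rest, full =>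
    if i > 0 ∧ (c = '+' ∨ c = '-') then
      let pref := full.take (i + 1)
      if pref.count '(' = pref.count ')' then (true, (i : Int))
      else findB rest full
    else findB rest full

def pending_addition_py_alt (expression : String) : Bool × Int :=
  findB (enumFromB 0 expression.toList) expression.toList

-- ===== PRECONDITION & SPEC =====
def Spec_pending_addition_py (expression : String) (out : Bool × Int) : Prop := out = pending_addition_py_alt expression
instance (expression : String) (out : Bool × Int) : Decidable (Spec_pending_addition_py expression out) := by unfold Spec_pending_addition_py; infer_instance

-- ===== CLAIM (what is proved, stated in full; the proofs are below) =====
def Claim_equal_pending_addition_py : Prop := ∀ (expression : String), Dom_pending_addition_py expression → Spec_pending_addition_py expression (pending_addition_py expression)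

-- ===== LEMMAS AND PROOFS =====
-- the prefix of pre ++ c :: cs of length |pre| + 1 is pre ++ [c]
lemma take_pre (pre : List Char) (c : Char) (cs : List Char) :
    (pre ++ c :: cs).take (pre.length + 1) = pre ++ [c] := by
  induction pre with
  | nil => simp
  | cons p ps ih => simp [ih]

-- invariant: A's counter over the processed prefix equals its '(' count minus its ')' count
lemma main_loop (s : List Char) : ∀ (pre : List Char),
    pendingA s pre.length ((pre.count '(' : Int) - pre.count ')')
      = findB (enumFromB pre.length s) (pre ++ s) := by
  induction s with
  | nil => intro pre; simp [pendingA, enumFromB, findB]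
  | cons c cs ih =>
    intro pre
    have hcnt : (if c = ')' then (if c = '(' then ((pre.count '(' : Int) - pre.count ')') + 1
                    else ((pre.count '(' : Int) - pre.count ')'))- 1
                 else (if c = '(' then ((pre.count '(' : Int) - pre.count ')') + 1
                    else ((pre.count '(' : Int) - pre.count ')')))
        = (((pre ++ [c]).count '(' : Int) - (pre ++ [c]).count ')') := by
      by_cases h1 : c = '(' <;> by_cases h2 : c = ')' <;>
        simp [h1, h2, List.count_append] <;> push_cast <;> try ring
    have hrec := ih (pre ++ [c])
    simp only [List.length_append, List.length_cons, List.length_nil, List.append_assoc,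
      List.cons_append, List.nil_append, List.count_append, Nat.zero_add] at hrec
    simp only [pendingA, enumFromB, findB, hcnt, take_pre, List.count_append]
    by_cases hi : pre.length > 0
    · by_cases hc : c = '+' ∨ c = '-'
      · by_cases hz : List.count '(' pre + List.count '(' [c]
                        = List.count ')' pre + List.count ')' [c]
        · have hz2 : ((List.count '(' pre + List.count '(' [c] : Nat) : Int)
              - ((List.count ')' pre + List.count ')' [c] : Nat) : Int) = 0 := by
            push_cast; omega
          rw [if_pos ⟨hi, hc, hz2⟩, if_pos ⟨hi, hc⟩, if_pos hz]
        · have hz2 : ¬ (((List.count '(' pre + List.count '(' [c] : Nat) : Int)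
              - ((List.count ')' pre + List.count ')' [c] : Nat) : Int) = 0) := by
            push_cast; omega
          rw [if_neg (fun h => hz2 h.2.2), if_pos ⟨hi, hc⟩, if_neg hz]
          exact hrec
      · rw [if_neg (fun h => hc h.2.1), if_neg (fun h => hc h.2)]
        exact hrec
    · rw [if_neg (fun h => hi h.1), if_neg (fun h => hi h.1)]
      exact hrec

-- ===== VERDICT (by name: the statement is the Claim_ definition above) =====
theorem pending_addition_py_spec : Claim_equal_pending_addition_py := by
  intro e _
  unfold Spec_pending_addition_py pending_addition_py pending_addition_py_alt
  have h := main_loop e.toList ([] : List Char)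
  simpa using h
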